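-- pv_equiv track=rewrite | github.com/ahadrauf/dxf_stl_renderer | scripts_pcb/generate_pcb_square_uvlasercutter_split.py | generate_nets
-- ===== SOURCE A (Python) =====
-- def generate_nets(nx, ny):
--     net_names = []
--     net_classes = []
--
--     # Add control wires for all the transistors
--     for i in range(nx*ny):
--         net_names += ["/OUT_" + str(i//ny + 1) + str(i%ny + 1)]
--         net_classes += [1]
--
--     # Add a random net for miscellaneous test connections
--     net_names += ["Test"]
--     net_classes += [1]
--
--     net_strings = {net: str(i + 1) + " " + net for i, net in enumerate(net_names)}
--     return net_names, net_classes, net_strings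
-- ===== SOURCE B (Python) =====
-- def generate_nets(nx, ny):
--     # Single fused pass: names, classes and the numbered-string dict are all
--     # built together with a running counter, instead of A's staged passes
--     # (build lists first, then enumerate them to build the dict).
--     net_names = []
--     net_classes = []
--     net_strings = {}
--     k = 1
--     if nx > 0 and ny > 0:
--         for i in range(nx):
--             for j in range(ny):
--                 name = "/OUT_" + str(i + 1) + str(j + 1)
--                 net_names.append(name)
--                 net_classes.append(1)
--                 net_strings[name] = str(k) + " " + name
--                 k += 1
--     net_names.append("Test")
--     net_classes.append(1)
--     net_strings["Test"] = str(k) + " Test"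
--     return net_names, net_classes, net_strings
-- ===== Notes on version B (the rewrite author's own statement) =====
-- stated objective: alternative
-- what changed: B replaces A's staged construction (first a loop over range(nx*ny) with divmod index reconstruction building names and classes, then a second enumerate pass over the finished name list to build the dict) by a single fused pass: nested row/column loops compute each name directly and append the name, the class and the numbered dict entry together, keeping a running counter, so both the divmod arithmetic and the second enumerate pass disappear.
-- intended difference: When nx < 0 and ny < 0 (so nx*ny > 0) A still iterates nx*ny times and fabricates nets like '/OUT_11', '/OUT_00' from floor-division of nonnegative i by negative ny, while B returns just the 'Test' net: for negative grid dimensions an empty grid is the intended result, A's names are an accident of range(nx*ny). — e.g. on generate_nets(-1, -2): A returns (["/OUT_11", "/OUT_00", "Test"], [1, 1, 1], [("/OUT_11", "1 /OUT_11"), ("/OUT_00", "2 /OUT_00"), ("Test", "3 Test")]), B returns (["Test"], [1], [("Test", "1 Test")])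
import Mathlib
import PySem

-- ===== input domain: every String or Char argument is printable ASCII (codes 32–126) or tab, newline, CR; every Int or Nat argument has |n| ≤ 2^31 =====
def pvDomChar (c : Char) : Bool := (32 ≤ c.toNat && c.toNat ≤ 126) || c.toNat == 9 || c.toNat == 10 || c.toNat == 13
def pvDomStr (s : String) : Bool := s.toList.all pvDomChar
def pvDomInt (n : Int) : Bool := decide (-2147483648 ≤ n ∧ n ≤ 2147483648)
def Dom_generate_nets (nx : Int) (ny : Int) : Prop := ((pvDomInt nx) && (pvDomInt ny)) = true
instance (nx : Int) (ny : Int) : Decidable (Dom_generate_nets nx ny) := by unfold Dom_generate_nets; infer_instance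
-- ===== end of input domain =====

-- B builds names, classes and the numbered-string dict in ONE fused pass over nested row/column
-- loops with a running counter, instead of A's staged passes (flat divmod loop, then an
-- enumerate pass over the finished name list): a different decomposition, same cost.

-- ===== PORT A =====
def generate_nets (nx : Int) (ny : Int) : List String × List Int × (List (String × String)) :=
  let st := (PySem.List.pyRange 0 (nx*ny)).foldl
    (fun (st : List String × List Int) i =>
      (st.1 ++ ["/OUT_" ++ PySem.Int.toStr (PySem.Int.floordiv i ny + 1) ++ PySem.Int.toStr (PySem.Int.mod i ny + 1)],
       st.2 ++ [(1 : Int)])) ([], [])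
  let net_names := st.1 ++ ["Test"]
  let net_classes := st.2 ++ [(1 : Int)]
  let net_strings := (PySem.List.enumerate net_names).foldl
    (fun (d : PySem.Dict String String) p => d.insert p.2 (PySem.Int.toStr (p.1 + 1) ++ " " ++ p.2))
    PySem.Dict.empty
  (net_names, net_classes, net_strings.items)

-- ===== PORT B =====
def generate_nets_alt (nx : Int) (ny : Int) : List String × List Int × (List (String × String)) :=
  let st := if 0 < nx ∧ 0 < ny then
    (PySem.List.pyRange 0 nx).foldl
      (fun (st : List String × List Int × PySem.Dict String String × Int) i =>
        (PySem.List.pyRange 0 ny).foldl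
          (fun (st2 : List String × List Int × PySem.Dict String String × Int) j =>
            let name := "/OUT_" ++ PySem.Int.toStr (i + 1) ++ PySem.Int.toStr (j + 1)
            (st2.1 ++ [name], st2.2.1 ++ [(1 : Int)],
             st2.2.2.1.insert name (PySem.Int.toStr st2.2.2.2 ++ " " ++ name),
             st2.2.2.2 + 1)) st)
      ([], [], PySem.Dict.empty, 1)
    else ([], [], PySem.Dict.empty, 1)
  let net_names := st.1 ++ ["Test"]
  let net_classes := st.2.1 ++ [(1 : Int)]
  let net_strings := st.2.2.1.insert "Test" (PySem.Int.toStr st.2.2.2 ++ " " ++ "Test")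
  (net_names, net_classes, net_strings.items)

-- ===== PRECONDITION & SPEC =====
-- When nx < 0 and ny < 0 (so nx*ny > 0) A still iterates nx*ny times and fabricates nets like
-- "/OUT_11", "/OUT_00" from floor-division of nonnegative i by negative ny, while B returns just
-- the "Test" net: for negative grid dimensions an empty grid is the intended result.
def D_generate_nets (nx : Int) (ny : Int) : Prop := nx < 0 ∧ ny < 0
instance (nx : Int) (ny : Int) : Decidable (D_generate_nets nx ny) := by unfold D_generate_nets; infer_instance

def Spec_generate_nets (nx : Int) (ny : Int) (out : List String × List Int × (List (String × String))) : Prop := ¬ D_generate_nets nx ny → out = generate_nets_alt nx ny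
instance (nx : Int) (ny : Int) (out : List String × List Int × (List (String × String))) : Decidable (Spec_generate_nets nx ny out) := by unfold Spec_generate_nets; infer_instance

def pvDiffWitness_generate_nets : Int × Int := (-1, -2)
def pvDiffWitnessOut_generate_nets : (List String × List Int × (List (String × String))) × (List String × List Int × (List (String × String))) :=
  ((["/OUT_11", "/OUT_00", "Test"], [1, 1, 1],
    [("/OUT_11", "1 /OUT_11"), ("/OUT_00", "2 /OUT_00"), ("Test", "3 Test")]),
   (["Test"], [1], [("Test", "1 Test")]))

-- ===== CLAIM (what is proved, stated in full; the proofs are below) =====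
def Claim_unchanged_generate_nets : Prop := ∀ (nx : Int) (ny : Int), Dom_generate_nets nx ny → Spec_generate_nets nx ny (generate_nets nx ny)
def Claim_changed_generate_nets : Prop := Dom_generate_nets (pvDiffWitness_generate_nets.1) (pvDiffWitness_generate_nets.2) ∧ D_generate_nets (pvDiffWitness_generate_nets.1) (pvDiffWitness_generate_nets.2) ∧ generate_nets (pvDiffWitness_generate_nets.1) (pvDiffWitness_generate_nets.2) = pvDiffWitnessOut_generate_nets.1 ∧ generate_nets_alt (pvDiffWitness_generate_nets.1) (pvDiffWitness_generate_nets.2) = pvDiffWitnessOut_generate_nets.2 ∧ pvDiffWitnessOut_generate_nets.1 ≠ pvDiffWitnessOut_generate_nets.2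
def Claim_exact_generate_nets : Prop := ∀ (nx : Int) (ny : Int), Dom_generate_nets nx ny → D_generate_nets nx ny → generate_nets nx ny ≠ generate_nets_alt nx ny

-- ===== LEMMAS AND PROOFS =====

-- B's fused per-name step, named for the proofs
def pvStep (st : List String × List Int × PySem.Dict String String × Int) (name : String) :
    List String × List Int × PySem.Dict String String × Int :=
  (st.1 ++ [name], st.2.1 ++ [(1 : Int)],
   st.2.2.1.insert name (PySem.Int.toStr st.2.2.2 ++ " " ++ name),
   st.2.2.2 + 1)

-- the dict built by inserting each name with its running-counter value
def pvDFold (d : PySem.Dict String String) (k : Int) : List String → PySem.Dict String String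
  | [] => d
  | x :: xs => pvDFold (d.insert x (PySem.Int.toStr k ++ " " ++ x)) (k + 1) xs

lemma pvDFold_append (xs ys : List String) : ∀ (d : PySem.Dict String String) (k : Int),
    pvDFold d k (xs ++ ys) = pvDFold (pvDFold d k xs) (k + xs.length) ys := by
  induction xs with
  | nil => intro d k; simp [pvDFold]
  | cons x xs ih =>
    intro d k
    simp only [List.cons_append, pvDFold, ih, List.length_cons]
    congr 1
    push_cast
    ring

-- folding B's step over a name list, in closed form
lemma pv_fold_step (xs : List String) : ∀ (a : List String) (b : List Int)
    (d : PySem.Dict String String) (k : Int),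
    xs.foldl pvStep (a, b, d, k) =
      (a ++ xs, b ++ xs.map (fun _ => (1 : Int)), pvDFold d k xs, k + xs.length) := by
  induction xs with
  | nil => intro a b d k; simp [pvDFold]
  | cons x xs ih =>
    intro a b d k
    simp only [List.foldl_cons, pvStep, ih, pvDFold, List.map_cons, List.length_cons]
    simp only [Prod.mk.injEq]
    refine ⟨by simp, by simp, ?_⟩
    constructor
    · trivial
    · push_cast; ring

-- A's enumerate-pass dict is the same running-counter dict
lemma pv_enum_dfold (xs : List String) : ∀ (d : PySem.Dict String String) (s : Int),
    (PySem.List.enumerate xs s).foldl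
      (fun (d : PySem.Dict String String) p => d.insert p.2 (PySem.Int.toStr (p.1 + 1) ++ " " ++ p.2)) d =
    pvDFold d (s + 1) xs := by
  induction xs with
  | nil => intro d s; simp [PySem.List.enumerate_nil, pvDFold]
  | cons x xs ih =>
    intro d s
    rw [PySem.List.enumerate_cons]
    simp only [List.foldl_cons, pvDFold, ih]

-- folding step over each block in turn is folding it over the concatenation
lemma pv_fold_flat {β : Type} (l : List β) (f : β → List String) :
    ∀ (st : List String × List Int × PySem.Dict String String × Int),
    l.foldl (fun st i => (f i).foldl pvStep st) st = (l.flatMap f).foldl pvStep st := by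
  induction l with
  | nil => intro st; simp
  | cons x l ih => intro st; simp [List.foldl_append, ih]

-- the divmod reconstruction over a flat range of m*n indices is the nested row/column traversal
lemma pv_nat_key {α : Type} (m n : Nat) (G : Nat → Nat → α) :
    (List.range (m*n)).map (fun k => G (k / n) (k % n)) =
    (List.range m).flatMap (fun i => (List.range n).map (G i)) := by
  induction m with
  | zero => simp
  | succ m ih =>
    have h1 : (m+1)*n = m*n + n := by ring
    rw [h1, List.range_add, List.map_append, ih, List.range_succ, List.flatMap_append]
    congr 1
    simp only [List.flatMap_cons, List.flatMap_nil, List.append_nil, List.map_map]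
    apply List.map_congr_left
    intro j hj
    have hj' : j < n := List.mem_range.mp hj
    have hn : 0 < n := by omega
    have hd : (m*n + j) / n = m := by
      rw [Nat.mul_comm m n, Nat.mul_add_div hn, Nat.div_eq_of_lt hj']
      omega
    have hm : (m*n + j) % n = j := by
      rw [Nat.mul_comm m n, Nat.mul_add_mod, Nat.mod_eq_of_lt hj']
    simp [Function.comp, hd, hm]

lemma pv_cast_key {α : Type} (m n : Nat) (F : Int → Int → α) :
    (List.range (m*n)).map (fun (k : Nat) => F (PySem.Int.floordiv (k : Int) (n : Int)) (PySem.Int.mod (k : Int) (n : Int))) =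
    (List.range m).flatMap (fun (i : Nat) => (List.range n).map (fun (j : Nat) => F (i : Int) (j : Int))) := by
  rw [← pv_nat_key m n (fun a b => F (a : Int) (b : Int))]
  apply List.map_congr_left
  intro k _
  rw [PySem.Int.floordiv_natCast, PySem.Int.mod_natCast]

lemma pv_key {α : Type} (nx ny : Int) (h : ¬ (nx < 0 ∧ ny < 0)) (F : Int → Int → α) :
    (PySem.List.pyRange 0 (nx*ny)).map (fun i => F (PySem.Int.floordiv i ny) (PySem.Int.mod i ny)) =
    (PySem.List.pyRange 0 nx).flatMap (fun i => (PySem.List.pyRange 0 ny).map (fun j => F i j)) := by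
  rcases lt_or_ge nx 0 with hx | hx
  · have hy : 0 ≤ ny := by by_contra hy; exact h ⟨hx, by omega⟩
    have hxy : nx * ny ≤ 0 := by nlinarith
    simp [PySem.List.pyRange_one, show (nx * ny).toNat = 0 by omega, show nx.toNat = 0 by omega]
  · rcases lt_or_ge ny 0 with hy | hy
    · have hxy : nx * ny ≤ 0 := by nlinarith
      simp [PySem.List.pyRange_one, show (nx * ny).toNat = 0 by omega, show ny.toNat = 0 by omega]
    · obtain ⟨m, rfl⟩ := Int.eq_ofNat_of_zero_le hx
      obtain ⟨n, rfl⟩ := Int.eq_ofNat_of_zero_le hy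
      have e1 : ((m : Int) * (n : Int)).toNat = m * n := by
        rw [← Nat.cast_mul, Int.toNat_natCast]
      simp only [PySem.List.pyRange_one, sub_zero, e1, Int.toNat_natCast, zero_add,
        List.map_map, List.flatMap_map]
      simp only [Function.comp_def]
      exact pv_cast_key m n F

-- the accumulated pair state of A's first loop, in closed form
lemma pv_st_A (nx ny : Int) :
    (PySem.List.pyRange 0 (nx*ny)).foldl
      (fun (st : List String × List Int) i =>
        (st.1 ++ ["/OUT_" ++ PySem.Int.toStr (PySem.Int.floordiv i ny + 1) ++ PySem.Int.toStr (PySem.Int.mod i ny + 1)],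
         st.2 ++ [(1 : Int)])) ([], []) =
    ((PySem.List.pyRange 0 (nx*ny)).map
       (fun i => "/OUT_" ++ PySem.Int.toStr (PySem.Int.floordiv i ny + 1) ++ PySem.Int.toStr (PySem.Int.mod i ny + 1)),
     (PySem.List.pyRange 0 (nx*ny)).map (fun _ => (1 : Int))) := by
  have h := PySem.List.foldl_prod_mk
    (fun (a : List String) (i : Int) =>
      a ++ ["/OUT_" ++ PySem.Int.toStr (PySem.Int.floordiv i ny + 1) ++ PySem.Int.toStr (PySem.Int.mod i ny + 1)])
    (fun (b : List Int) (_ : Int) => b ++ [(1 : Int)])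
    (PySem.List.pyRange 0 (nx*ny)) [] []
  exact h.trans (by
    rw [PySem.List.foldl_append_singleton_eq_map, PySem.List.foldl_append_singleton_eq_map]
    simp)

-- B's fused nested loop, in closed form over the flat name list
lemma pv_st_B (nx ny : Int) :
    (if 0 < nx ∧ 0 < ny then
    (PySem.List.pyRange 0 nx).foldl
      (fun (st : List String × List Int × PySem.Dict String String × Int) i =>
        (PySem.List.pyRange 0 ny).foldl
          (fun (st2 : List String × List Int × PySem.Dict String String × Int) j =>
            let name := "/OUT_" ++ PySem.Int.toStr (i + 1) ++ PySem.Int.toStr (j + 1)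
            (st2.1 ++ [name], st2.2.1 ++ [(1 : Int)],
             st2.2.2.1.insert name (PySem.Int.toStr st2.2.2.2 ++ " " ++ name),
             st2.2.2.2 + 1)) st)
      ([], [], PySem.Dict.empty, 1)
    else ([], [], PySem.Dict.empty, 1)) =
    (let L := (PySem.List.pyRange 0 nx).flatMap
        (fun i => (PySem.List.pyRange 0 ny).map (fun j => "/OUT_" ++ PySem.Int.toStr (i + 1) ++ PySem.Int.toStr (j + 1)))
     (L, L.map (fun _ => (1 : Int)), pvDFold PySem.Dict.empty 1 L, (1 : Int) + (L.length : Int))) := by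
  by_cases hg : 0 < nx ∧ 0 < ny
  case neg =>
    rw [if_neg hg]
    have hL : (PySem.List.pyRange 0 nx).flatMap
        (fun i => (PySem.List.pyRange 0 ny).map (fun j => "/OUT_" ++ PySem.Int.toStr (i + 1) ++ PySem.Int.toStr (j + 1))) = [] := by
      rcases not_and_or.mp hg with hx | hy
      · rw [PySem.List.pyRange_one]
        simp
        omega
      · have : PySem.List.pyRange 0 ny = [] := by
          rw [PySem.List.pyRange_one]
          simp
          omega
        simp [this]
    simp [hL, pvDFold]
  rw [if_pos hg]
  have hfe : (fun (st : List String × List Int × PySem.Dict String String × Int) (i : Int) =>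
      (PySem.List.pyRange 0 ny).foldl
        (fun (st2 : List String × List Int × PySem.Dict String String × Int) j =>
          let name := "/OUT_" ++ PySem.Int.toStr (i + 1) ++ PySem.Int.toStr (j + 1)
          (st2.1 ++ [name], st2.2.1 ++ [(1 : Int)],
           st2.2.2.1.insert name (PySem.Int.toStr st2.2.2.2 ++ " " ++ name),
           st2.2.2.2 + 1)) st) =
      (fun (st : List String × List Int × PySem.Dict String String × Int) (i : Int) =>
        ((PySem.List.pyRange 0 ny).map
          (fun j => "/OUT_" ++ PySem.Int.toStr (i + 1) ++ PySem.Int.toStr (j + 1))).foldl pvStep st) := by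
    funext st i
    rw [List.foldl_map]
    rfl
  rw [hfe, pv_fold_flat, pv_fold_step]
  simp

-- ===== VERDICT (by name: the statement is the Claim_ definition above) =====
theorem generate_nets_spec : Claim_unchanged_generate_nets := by
  intro nx ny _ hD
  have hnames := pv_key nx ny hD (fun a b => "/OUT_" ++ PySem.Int.toStr (a + 1) ++ PySem.Int.toStr (b + 1))
  unfold generate_nets generate_nets_alt
  rw [pv_st_A, pv_st_B]
  simp only [← hnames, List.map_map, Function.comp_def]
  rw [pv_enum_dfold, pvDFold_append]
  simp [pvDFold, List.length_map, add_comm]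

theorem generate_nets_changed : Claim_changed_generate_nets := by
  unfold Claim_changed_generate_nets; decide

theorem generate_nets_tight : Claim_exact_generate_nets := by
  intro nx ny _ hD heq
  obtain ⟨hx, hy⟩ := hD
  have hpos : 0 < nx * ny := mul_pos_of_neg_of_neg hx hy
  have hBnil : PySem.List.pyRange 0 nx = [] := by
    rw [PySem.List.pyRange_one]
    simp
    omega
  have h1 := congrArg (fun r => r.1.length) heq
  unfold generate_nets generate_nets_alt at h1
  rw [pv_st_A, pv_st_B] at h1
  simp [hBnil, PySem.List.pyRange_one] at h1
  omega
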